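-- pv_equiv track=rewrite | github.com/richardhuangz/cky-parser | CNF.py | sortish
-- ===== SOURCE A (Python) =====
-- def sortish(grammar):
--     ntnt = []
--     ntt = []
--     result = []
--     for line in grammar:
--         trueline = ""
--         for word in line:
--             trueline += word + " "
--         trueline = trueline.strip()
--         if len(line) == 2:
--             ntt.append(trueline)
--         else:
--             ntnt.append(trueline)
--     ntnt.sort()
--     ntt.sort()
--
--     for line in ntnt:
--         result.append(line)
--     for line in ntt:
--         result.append(line)
--
--     return result
-- ===== SOURCE B (Python) =====
-- def sortish(grammar):
--     return [(" ".join(line)).strip()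
--             for line in sorted(grammar,
--                                key=lambda line: (len(line) == 2, (" ".join(line)).strip()))]
-- ===== Notes on version B (the rewrite author's own statement) =====
-- stated objective: simpler
-- what changed: Replaces the manual partition loop with per-word string concatenation, two separate sorts and two append loops by a single sorted() over the grammar with a composite (len==2, joined-and-stripped) key followed by one comprehension.
import Mathlib
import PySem

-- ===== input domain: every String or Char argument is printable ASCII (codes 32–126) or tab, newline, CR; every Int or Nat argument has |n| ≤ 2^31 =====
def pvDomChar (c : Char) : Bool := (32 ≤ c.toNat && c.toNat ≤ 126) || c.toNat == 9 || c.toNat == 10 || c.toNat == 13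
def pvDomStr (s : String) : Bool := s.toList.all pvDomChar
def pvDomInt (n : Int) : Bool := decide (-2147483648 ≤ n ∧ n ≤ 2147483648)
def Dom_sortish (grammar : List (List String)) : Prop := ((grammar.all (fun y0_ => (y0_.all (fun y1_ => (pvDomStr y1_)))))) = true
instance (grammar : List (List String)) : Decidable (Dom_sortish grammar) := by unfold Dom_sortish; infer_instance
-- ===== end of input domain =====

-- B replaces A's manual partition loop, two sorts and two append loops by one keyed sort
-- plus a comprehension (objective: simpler); same return value, no side effects involved.

-- ===== PORT A =====
-- trueline = "": for word in line: trueline += word + " "; trueline = trueline.strip()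
def pvTrueline (line : List String) : String :=
  PySem.Str.strip (line.foldl (fun t w => t ++ w ++ " ") "")

def sortish (grammar : List (List String)) : List String :=
  let st := grammar.foldl
    (fun (st : List String × List String) line =>
      let trueline := pvTrueline line
      if line.length == 2 then (st.1, st.2 ++ [trueline]) else (st.1 ++ [trueline], st.2))
    ([], [])
  let ntnt := PySem.List.sorted st.1 (fun x => x) false
  let ntt := PySem.List.sorted st.2 (fun x => x) false
  let result := ntnt.foldl (fun r l => r ++ [l]) []
  ntt.foldl (fun r l => r ++ [l]) result

-- ===== PORT B =====
-- (" ".join(line)).strip()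
def pvJoined (line : List String) : String :=
  PySem.Str.strip (PySem.Str.join " " line)

def sortish_alt (grammar : List (List String)) : List String :=
  (PySem.List.sorted2 grammar
      (fun line => if line.length == 2 then (1 : Nat) else 0)  -- Python bool key False<True as 0<1
      pvJoined false).map pvJoined

-- ===== PRECONDITION & SPEC =====
def Spec_sortish (grammar : List (List String)) (out : List String) : Prop := out = sortish_alt grammar
instance (grammar : List (List String)) (out : List String) : Decidable (Spec_sortish grammar out) := by unfold Spec_sortish; infer_instance

-- ===== CLAIM (what is proved, stated in full; the proofs are below) =====
def Claim_equal_sortish : Prop := ∀ (grammar : List (List String)), Dom_sortish grammar → Spec_sortish grammar (sortish grammar)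

-- ===== LEMMAS AND PROOFS =====

-- strip (s + " ") = strip s
theorem pv_strip_append_space (s : List Char) :
    PySem.Chars.strip (s ++ [' ']) = PySem.Chars.strip s := by
  unfold PySem.Chars.strip PySem.Chars.lstrip PySem.Chars.rstrip
  rw [List.dropWhile_append]
  have hsp : PySem.Chars.isspace ' ' = true := by decide
  by_cases h : (List.dropWhile PySem.Chars.isspace s).isEmpty
  · have heq : List.dropWhile PySem.Chars.isspace s = [] := List.isEmpty_iff.mp h
    simp [heq, hsp]
  · rw [if_neg h, List.reverse_append]
    simp [hsp]

-- concat of (w ++ " ") = " ".join(ws) ++ " " for nonempty ws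
theorem pv_flatten_eq_join (ws : List (List Char)) (hne : ws ≠ []) :
    (ws.map (fun w => w ++ [' '])).flatten = PySem.Chars.join [' '] ws ++ [' '] := by
  induction ws with
  | nil => exact absurd rfl hne
  | cons w t ih =>
    cases t with
    | nil => simp [PySem.Chars.join_singleton]
    | cons w' t' =>
      rw [show ((w :: w' :: t').map (fun w => w ++ [' '])).flatten
            = (w ++ [' ']) ++ ((w' :: t').map (fun w => w ++ [' '])).flatten by simp]
      rw [ih (by simp), PySem.Chars.join_cons_cons]
      simp

theorem pv_trueline_eq (line : List String) : pvTrueline line = pvJoined line := by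
  apply String.toList_inj.mp
  unfold pvTrueline pvJoined
  rw [PySem.Str.toList_strip, PySem.Str.toList_strip, PySem.Str.toList_join]
  have hfold : ∀ (l : List String) (t0 : String),
      (l.foldl (fun t w => t ++ w ++ " ") t0).toList
        = t0.toList ++ (l.map (fun w => w.toList ++ [' '])).flatten := by
    intro l
    induction l with
    | nil => intro t0; simp
    | cons w t ih =>
      intro t0
      simp only [List.foldl_cons, ih, List.map_cons, List.flatten_cons]
      simp [String.toList_append]
  rw [hfold]
  have hsep : " ".toList = [' '] := rfl
  rw [hsep]
  cases line with
  | nil => rfl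
  | cons w t =>
    rw [show ((w :: t).map (fun w => w.toList ++ [' ']))
          = (((w :: t).map String.toList).map (fun c => c ++ [' '])) by
        simp [List.map_map, Function.comp_def]]
    rw [show ("" : String).toList = [] from rfl, List.nil_append]
    rw [pv_flatten_eq_join ((w :: t).map String.toList) (by simp), pv_strip_append_space]

-- A's partition loop = two filters (stated on the zeta-reduced loop body)
theorem pv_part_fold (g : List (List String)) (a b : List String) :
    g.foldl
      (fun (st : List String × List String) line =>
        if line.length == 2 then (st.1, st.2 ++ [pvTrueline line])
        else (st.1 ++ [pvTrueline line], st.2))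
      (a, b)
    = (a ++ (g.filter (fun l => !(l.length == 2))).map pvTrueline,
       b ++ (g.filter (fun l => l.length == 2)).map pvTrueline) := by
  induction g generalizing a b with
  | nil => simp
  | cons x t ih =>
    simp only [List.foldl_cons, List.filter_cons]
    rcases Bool.eq_false_or_eq_true (x.length == 2) with hx | hx
    · rw [if_pos hx, ih]; simp [hx]
    · rw [if_neg (by simp [hx]), ih]; simp [hx]

theorem pv_foldl_app (l acc : List String) :
    l.foldl (fun r x => r ++ [x]) acc = acc ++ l := by
  induction l generalizing acc with
  | nil => simp
  | cons x t ih => simp [List.foldl_cons, ih]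

-- insertBy only tests `before x ·` on members
theorem pv_insertBy_congr {α : Type} (b1 b2 : α → α → Bool) (x : α) (l : List α)
    (h : ∀ y ∈ l, b1 x y = b2 x y) :
    PySem.List.insertBy b1 x l = PySem.List.insertBy b2 x l := by
  induction l with
  | nil => rfl
  | cons y ys ih =>
    simp only [PySem.List.insertBy]
    rw [h y (by simp)]
    by_cases hb : b2 x y
    · simp [hb]
    · rw [ih (fun z hz => h z (by simp [hz]))]

-- map over an insertBy keyed through f
theorem pv_map_insertBy {α : Type} (f : α → String) (x : α) (l : List α) :
    (PySem.List.insertBy (fun a c => decide (f a < f c)) x l).map f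
      = PySem.List.insertBy (fun a c => decide (a < c)) (f x) (l.map f) := by
  induction l with
  | nil => rfl
  | cons y ys ih =>
    simp only [PySem.List.insertBy, List.map_cons]
    by_cases hb : f x < f y
    · simp [hb]
    · have hb' : decide (f x < f y) = false := decide_eq_false hb
      simp only [hb', Bool.false_eq_true, if_false, List.map_cons, ih]

theorem pv_map_foldl_ins {α : Type} (f : α → String) (xs : List α) (acc : List α) :
    (xs.foldl (fun acc x => PySem.List.insertBy (fun a c => decide (f a < f c)) x acc) acc).map f
      = (xs.map f).foldl
          (fun acc y => PySem.List.insertBy (fun a c => decide (a < c)) y acc) (acc.map f) := by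
  induction xs generalizing acc with
  | nil => rfl
  | cons x t ih =>
    simp only [List.foldl_cons, List.map_cons, ih, pv_map_insertBy]

theorem pv_map_sorted {α : Type} (f : α → String) (xs : List α) :
    (xs.foldl (fun acc x => PySem.List.insertBy (fun a c => decide (f a < f c)) x acc) []).map f
      = PySem.List.sorted (xs.map f) (fun x => x) false := by
  have h := PySem.List.sorted_eq_foldl_insertBy (xs.map f) (fun x => x)
  rw [h, pv_map_foldl_ins]
  rfl

-- inserting a first-key-0 element into (zeros ++ ones) under the lexicographic order
theorem pv_ins_low {α : Type} (f : α → Bool) (J : α → String)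
    (x : α) (hx : f x = false) (A0 A1 : List α)
    (h0 : ∀ a ∈ A0, f a = false) (h1 : ∀ a ∈ A1, f a = true) :
    PySem.List.insertBy
        (fun a b => decide ((if f a then (1:Nat) else 0) < (if f b then (1:Nat) else 0)) ||
          (!decide ((if f b then (1:Nat) else 0) < (if f a then (1:Nat) else 0)) && decide (J a < J b)))
        x (A0 ++ A1)
      = PySem.List.insertBy (fun a b => decide (J a < J b)) x A0 ++ A1 := by
  induction A0 with
  | nil =>
    cases A1 with
    | nil => rfl
    | cons y ys =>
      have hy : f y = true := h1 y (by simp)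
      simp [PySem.List.insertBy, hx, hy]
  | cons a t ih =>
    have ha : f a = false := h0 a (by simp)
    simp only [List.cons_append, PySem.List.insertBy]
    rw [ih (fun z hz => h0 z (by simp [hz]))]
    simp [hx, ha]
    split_ifs <;> simp

-- inserting a first-key-1 element into (zeros ++ ones)
theorem pv_ins_high {α : Type} (f : α → Bool) (J : α → String)
    (x : α) (hx : f x = true) (A0 A1 : List α)
    (h0 : ∀ a ∈ A0, f a = false) (h1 : ∀ a ∈ A1, f a = true) :
    PySem.List.insertBy
        (fun a b => decide ((if f a then (1:Nat) else 0) < (if f b then (1:Nat) else 0)) ||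
          (!decide ((if f b then (1:Nat) else 0) < (if f a then (1:Nat) else 0)) && decide (J a < J b)))
        x (A0 ++ A1)
      = A0 ++ PySem.List.insertBy (fun a b => decide (J a < J b)) x A1 := by
  induction A0 with
  | nil =>
    simp only [List.nil_append]
    apply pv_insertBy_congr
    intro y hy
    have hy' : f y = true := h1 y hy
    simp [hx, hy']
  | cons a t ih =>
    have ha : f a = false := h0 a (by simp)
    simp only [List.cons_append, PySem.List.insertBy]
    rw [ih (fun z hz => h0 z (by simp [hz]))]
    simp [hx, ha]

-- the stable sort with a {0,1}-valued first key splits into two keyed insertion folds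
theorem pv_fold_split {α : Type} (f : α → Bool) (J : α → String)
    (xs : List α) (A0 A1 : List α)
    (h0 : ∀ a ∈ A0, f a = false) (h1 : ∀ a ∈ A1, f a = true) :
    xs.foldl
      (fun acc x => PySem.List.insertBy
        (fun a b => decide ((if f a then (1:Nat) else 0) < (if f b then (1:Nat) else 0)) ||
          (!decide ((if f b then (1:Nat) else 0) < (if f a then (1:Nat) else 0)) && decide (J a < J b)))
        x acc) (A0 ++ A1)
    = (xs.filter (fun l => !(f l))).foldl
        (fun acc x => PySem.List.insertBy (fun a b => decide (J a < J b)) x acc) A0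
      ++ (xs.filter f).foldl
        (fun acc x => PySem.List.insertBy (fun a b => decide (J a < J b)) x acc) A1 := by
  induction xs generalizing A0 A1 with
  | nil => simp
  | cons x t ih =>
    simp only [List.foldl_cons, List.filter_cons]
    cases hfx : f x with
    | false =>
      rw [pv_ins_low f J x hfx A0 A1 h0 h1]
      rw [ih (PySem.List.insertBy (fun a b => decide (J a < J b)) x A0) A1
        (fun z hz => by
          rcases (PySem.List.mem_insertBy _ _ _ _).mp hz with h | h
          · exact h ▸ hfx
          · exact h0 z h) h1]
      simp
    | true =>
      rw [pv_ins_high f J x hfx A0 A1 h0 h1]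
      rw [ih A0 (PySem.List.insertBy (fun a b => decide (J a < J b)) x A1) h0
        (fun z hz => by
          rcases (PySem.List.mem_insertBy _ _ _ _).mp hz with h | h
          · exact h ▸ hfx
          · exact h1 z h)]
      simp

-- ===== VERDICT (by name: the statement is the Claim_ definition above) =====
theorem sortish_spec : Claim_equal_sortish := by
  intro g _
  unfold Spec_sortish
  have hfun : pvTrueline = pvJoined := funext pv_trueline_eq
  have hA : sortish g
      = PySem.List.sorted ((g.filter (fun l => !(l.length == 2))).map pvJoined) (fun x => x) false
        ++ PySem.List.sorted ((g.filter (fun l => l.length == 2)).map pvJoined) (fun x => x) false := by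
    simp only [sortish]
    rw [pv_part_fold g [] []]
    simp only [List.nil_append]
    rw [pv_foldl_app, pv_foldl_app, List.nil_append, hfun]
  have hsplit := pv_fold_split (fun l => l.length == 2) pvJoined g [] [] (by simp) (by simp)
  have hB : sortish_alt g
      = ((g.filter (fun l => !(l.length == 2))).foldl
            (fun acc x => PySem.List.insertBy (fun a b => decide (pvJoined a < pvJoined b)) x acc) []).map pvJoined
        ++ ((g.filter (fun l => l.length == 2)).foldl
            (fun acc x => PySem.List.insertBy (fun a b => decide (pvJoined a < pvJoined b)) x acc) []).map pvJoined := by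
    calc sortish_alt g
        = (((g.filter (fun l => !(l.length == 2))).foldl
              (fun acc x => PySem.List.insertBy (fun a b => decide (pvJoined a < pvJoined b)) x acc) []
            ++ (g.filter (fun l => l.length == 2)).foldl
              (fun acc x => PySem.List.insertBy (fun a b => decide (pvJoined a < pvJoined b)) x acc) []).map pvJoined) := by
          exact congrArg (List.map pvJoined) hsplit
      _ = _ := by rw [List.map_append]
  rw [hA, hB, pv_map_sorted pvJoined, pv_map_sorted pvJoined]
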